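-- pv_equiv track=rewrite | github.com/c0r0n3r/cryptodatahub | cryptodatahub/common/utils.py | name_to_enum_item_name
-- ===== SOURCE A (Python) =====
-- def name_to_enum_item_name(name):
--     converted_name = ''
--     for char in name:
--         if char.isalnum():
--             converted_name += char
--         elif converted_name and converted_name[-1] != '_':
--             converted_name += '_'
--
--     return converted_name.rstrip('_').upper()
-- ===== SOURCE B (Python) =====
-- def name_to_enum_item_name(name):
--     words = ''.join(c if c.isalnum() else ' ' for c in name).split()
--     return '_'.join(words).upper()
-- ===== Notes on version B (the rewrite author's own statement) =====
-- stated objective: idiomatic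
-- what changed: Replaces the char-by-char accumulator with last-char/pending-underscore bookkeeping and a trailing rstrip by mapping non-alphanumeric chars to spaces, splitting into the alphanumeric runs, and joining the runs with single underscores before uppercasing.
import Mathlib
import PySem

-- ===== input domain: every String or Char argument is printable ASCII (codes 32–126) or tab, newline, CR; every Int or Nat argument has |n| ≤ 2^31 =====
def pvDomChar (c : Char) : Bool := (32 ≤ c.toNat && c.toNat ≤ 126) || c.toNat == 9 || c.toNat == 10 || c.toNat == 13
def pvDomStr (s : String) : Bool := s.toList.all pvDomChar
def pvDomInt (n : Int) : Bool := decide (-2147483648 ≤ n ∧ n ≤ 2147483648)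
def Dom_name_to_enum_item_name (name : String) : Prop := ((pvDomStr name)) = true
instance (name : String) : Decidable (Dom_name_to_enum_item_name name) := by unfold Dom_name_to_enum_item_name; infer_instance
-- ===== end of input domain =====

-- B replaces A's char-by-char accumulator (with pending-underscore bookkeeping and a
-- trailing rstrip) by: map separators to spaces, split into alphanumeric runs, join with underscores, upper.


-- ===== PORT A =====
-- one loop step: append the alnum char, else append '_' unless empty or already ending in '_'
def pvStepA (acc : List Char) (c : Char) : List Char :=
  if PySem.Chars.isalnum c then acc ++ [c]
  else if !acc.isEmpty && acc.getLast? != some '_' then acc ++ ['_'] else acc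

-- the loop, then .rstrip('_') (hand port of str.rstrip('_'): drop trailing '_'; exact), then .upper()
def name_to_enum_item_name (name : String) : String :=
  String.ofList (PySem.Chars.upper
    (((name.toList.foldl pvStepA []).reverse.dropWhile (fun c => c == '_')).reverse))

-- ===== PORT B =====
-- ''.join(c if c.isalnum() else ' ' for c in name).split(), then '_'.join(words).upper()
def name_to_enum_item_name_alt (name : String) : String :=
  String.ofList (PySem.Chars.upper (PySem.Chars.join ['_']
    (PySem.Chars.split₀ (name.toList.map (fun c => if PySem.Chars.isalnum c then c else ' ')))))

-- ===== PRECONDITION & SPEC =====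
def Spec_name_to_enum_item_name (name : String) (out : String) : Prop := out = name_to_enum_item_name_alt name
instance (name : String) (out : String) : Decidable (Spec_name_to_enum_item_name name out) := by unfold Spec_name_to_enum_item_name; infer_instance

-- ===== CLAIM (what is proved, stated in full; the proofs are below) =====
def Claim_equal_name_to_enum_item_name : Prop := ∀ (name : String), Dom_name_to_enum_item_name name → Spec_name_to_enum_item_name name (name_to_enum_item_name name)

-- ===== LEMMAS AND PROOFS =====

-- drop trailing underscores (the rstrip('_') expression of port A, named for the proofs)
def pvRstripU (l : List Char) : List Char := (l.reverse.dropWhile (fun c => c == '_')).reverse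

-- A's loop output beyond the accumulator, parametrised by "acc nonempty and not ending in '_'"
def pvT (b : Bool) : List Char → List Char
  | [] => []
  | c :: cs =>
    if PySem.Chars.isalnum c then c :: pvT true cs
    else if b then '_' :: pvT false cs else pvT false cs

-- str.split() as forward recursion with the current word as accumulator
def pvW (w : List Char) : List Char → List (List Char)
  | [] => if w.isEmpty then [] else [w]
  | c :: cs =>
    if PySem.Chars.isspace c then (if w.isEmpty then pvW [] cs else w :: pvW [] cs)
    else pvW (w ++ [c]) cs

-- pvW after the space-mapping: the maximal alphanumeric runs
def pvV (w : List Char) : List Char → List (List Char)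
  | [] => if w.isEmpty then [] else [w]
  | c :: cs =>
    if PySem.Chars.isalnum c then pvV (w ++ [c]) cs
    else (if w.isEmpty then pvV [] cs else w :: pvV [] cs)

lemma pvAlnumBounds (c : Char) (h : PySem.Chars.isalnum c = true) :
    (48 ≤ c.toNat ∧ c.toNat ≤ 57) ∨ (65 ≤ c.toNat ∧ c.toNat ≤ 90) ∨ (97 ≤ c.toNat ∧ c.toNat ≤ 122) := by
  simp only [PySem.Chars.isalnum, PySem.Chars.isalpha, PySem.Chars.isdigit,
    PySem.Chars.isupper, PySem.Chars.islower, Bool.or_eq_true, Bool.and_eq_true,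
    decide_eq_true_eq, Char.le_def, UInt32.le_iff_toNat_le] at h
  simp only [Char.toNat] at *
  rcases h with (h | h) | h
  · right; left; exact ⟨h.1, h.2⟩
  · right; right; exact ⟨h.1, h.2⟩
  · left; exact ⟨h.1, h.2⟩

lemma pvAlnum_not_space (c : Char) (h : PySem.Chars.isalnum c = true) :
    PySem.Chars.isspace c = false := by
  have hb := pvAlnumBounds c h
  simp only [PySem.Chars.isspace, Bool.or_eq_false_iff, Bool.and_eq_false_iff,
    decide_eq_false_iff_not]
  omega

lemma pvAlnum_ne_underscore (c : Char) (h : PySem.Chars.isalnum c = true) : ¬ c = '_' := by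
  have hb := pvAlnumBounds c h
  rintro rfl
  revert hb
  decide

lemma pvSplitGo_eq : ∀ (l cur : List Char) (acc : List (List Char)),
    PySem.Chars.split₀.go l cur acc = acc.reverse ++ pvW cur.reverse l := by
  intro l
  induction l with
  | nil =>
    intro cur acc
    by_cases h : cur.isEmpty <;> simp [PySem.Chars.split₀.go, pvW, h]
  | cons c rest ih =>
    intro cur acc
    by_cases hs : PySem.Chars.isspace c
    · by_cases hc : cur.isEmpty
      · have hcur : cur = [] := by simpa using hc
        simp [PySem.Chars.split₀.go, hs, ih, pvW, hcur]
      · have : cur.reverse.isEmpty = false := by simp_all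
        simp [PySem.Chars.split₀.go, hs, hc, ih, pvW, this]
    · simp [PySem.Chars.split₀.go, hs, ih, pvW]

lemma pvSplit_eq (l : List Char) : PySem.Chars.split₀ l = pvW [] l := by
  simpa using pvSplitGo_eq l [] []

lemma pvWmap : ∀ (l w : List Char),
    pvW w (l.map (fun c => if PySem.Chars.isalnum c then c else ' ')) = pvV w l := by
  intro l
  induction l with
  | nil => intro w; rfl
  | cons c cs ih =>
    intro w
    by_cases h : PySem.Chars.isalnum c
    · simp [pvW, pvV, h, pvAlnum_not_space c h, ih]
    · have : PySem.Chars.isspace ' ' = true := by decide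
      simp [pvW, pvV, h, this, ih]

lemma pvRstripU_cons (c : Char) (x : List Char) :
    pvRstripU (c :: x) = if (c == '_') && (pvRstripU x).isEmpty then [] else c :: pvRstripU x := by
  unfold pvRstripU
  rw [List.reverse_cons, List.dropWhile_append]
  cases h : (x.reverse.dropWhile (fun c => c == '_')).isEmpty with
  | true =>
    have hnil : x.reverse.dropWhile (fun c => c == '_') = [] := by simpa using h
    cases hc : c == '_' with
    | true => simp [List.dropWhile, hc, hnil]
    | false => simp [List.dropWhile, hc, hnil]
  | false => simp [h]

lemma pvFold_eq : ∀ (l acc : List Char) (b : Bool),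
    b = (!acc.isEmpty && acc.getLast? != some '_') →
    l.foldl pvStepA acc = acc ++ pvT b l := by
  intro l
  induction l with
  | nil => intro acc b _; simp [pvT]
  | cons c cs ih =>
    intro acc b hb
    by_cases h : PySem.Chars.isalnum c
    · have hc : ((acc ++ [c]).getLast? != some '_') = true := by
        simp [List.getLast?_append, pvAlnum_ne_underscore c h]
      have := ih (acc ++ [c]) true (by rw [hc, Bool.and_true]; simp)
      simp [List.foldl_cons, pvStepA, h, pvT, this]
    · cases b with
      | true =>
        have hcond : (!acc.isEmpty && acc.getLast? != some '_') = true := hb.symm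
        have := ih (acc ++ ['_']) false (by simp [List.getLast?_append])
        simp [List.foldl_cons, pvStepA, h, hcond, pvT, this]
      | false =>
        have hcond : (!acc.isEmpty && acc.getLast? != some '_') = false := hb.symm
        have := ih acc false hb
        simp [List.foldl_cons, pvStepA, h, hcond, pvT, this]

lemma pvVne : ∀ (l : List Char),
    (∀ r ∈ pvV [] l, r ≠ []) ∧ (∀ w : List Char, w ≠ [] → ∀ r ∈ pvV w l, r ≠ []) := by
  intro l
  induction l with
  | nil =>
    refine ⟨by simp [pvV], ?_⟩
    intro w hw r hr
    have hw' : w.isEmpty = false := by simpa using hw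
    simp [pvV, hw'] at hr
    simpa [hr] using hw
  | cons c cs ih =>
    by_cases h : PySem.Chars.isalnum c
    · refine ⟨?_, ?_⟩
      · intro r hr
        exact ih.2 [c] (by simp) r (by simpa [pvV, h] using hr)
      · intro w hw r hr
        exact ih.2 (w ++ [c]) (by simp) r (by simpa [pvV, h] using hr)
    · refine ⟨?_, ?_⟩
      · intro r hr
        exact ih.1 r (by simpa [pvV, h] using hr)
      · intro w hw r hr
        have hw' : w.isEmpty = false := by simpa using hw
        simp [pvV, h, hw'] at hr
        rcases hr with rfl | hr
        · exact hw
        · exact ih.1 r hr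

lemma pvJoinV_nil_iff (l : List Char) :
    PySem.Chars.join ['_'] (pvV [] l) = [] ↔ pvV [] l = [] := by
  constructor
  · intro h
    cases hv : pvV [] l with
    | nil => rfl
    | cons r rs =>
      have hr : r ≠ [] := (pvVne l).1 r (by simp [hv])
      cases rs with
      | nil => rw [hv, PySem.Chars.join_singleton] at h; exact absurd h hr
      | cons q rest =>
        rw [hv, PySem.Chars.join_cons_cons] at h
        simp [hr] at h
  · intro h; rw [h, PySem.Chars.join_nil]

lemma pvMain : ∀ (l : List Char),
    (PySem.Chars.join ['_'] (pvV [] l) = pvRstripU (pvT false l)) ∧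
    (∀ w : List Char, w ≠ [] →
      PySem.Chars.join ['_'] (pvV w l) = w ++ pvRstripU (pvT true l)) := by
  intro l
  induction l with
  | nil =>
    refine ⟨by simp [pvV, pvT, pvRstripU, PySem.Chars.join_nil], ?_⟩
    intro w hw
    have hw' : w.isEmpty = false := by simpa using hw
    simp [pvV, pvT, pvRstripU, hw', PySem.Chars.join_singleton]
  | cons c cs ih =>
    by_cases h : PySem.Chars.isalnum c
    · have hcu : (c == '_') = false := by simp [pvAlnum_ne_underscore c h]
      refine ⟨?_, ?_⟩
      · rw [show pvV [] (c :: cs) = pvV [c] cs by simp [pvV, h],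
          show pvT false (c :: cs) = c :: pvT true cs by simp [pvT, h],
          ih.2 [c] (by simp), pvRstripU_cons]
        simp [hcu]
      · intro w hw
        rw [show pvV w (c :: cs) = pvV (w ++ [c]) cs by simp [pvV, h],
          show pvT true (c :: cs) = c :: pvT true cs by simp [pvT, h],
          ih.2 (w ++ [c]) (by simp), pvRstripU_cons]
        simp [hcu]
    · refine ⟨?_, ?_⟩
      · simp [pvV, pvT, h, ih.1]
      · intro w hw
        have hw' : w.isEmpty = false := by simpa using hw
        have hrw : pvRstripU (pvT true (c :: cs)) =
            if (pvRstripU (pvT false cs)).isEmpty then [] else '_' :: pvRstripU (pvT false cs) := by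
          rw [show pvT true (c :: cs) = '_' :: pvT false cs by simp [pvT, h], pvRstripU_cons]
          simp
        cases hv : pvV [] cs with
        | nil =>
          have hj : pvRstripU (pvT false cs) = [] := by
            rw [← ih.1, hv, PySem.Chars.join_nil]
          simp [pvV, h, hw', hv, hrw, hj, PySem.Chars.join_singleton]
        | cons q rest =>
          have hj : pvRstripU (pvT false cs) ≠ [] := by
            rw [← ih.1]
            intro hcon
            have := (pvJoinV_nil_iff cs).1 hcon
            rw [hv] at this
            exact absurd this (by simp)
          have hj' : (pvRstripU (pvT false cs)).isEmpty = false := by simpa using hj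
          rw [show pvV w (c :: cs) = w :: pvV [] cs by simp [pvV, h, hw'], hv,
            PySem.Chars.join_cons_cons, hrw, hj', ← hv, ih.1]
          simp

-- ===== VERDICT (by name: the statement is the Claim_ definition above) =====
theorem name_to_enum_item_name_spec : Claim_equal_name_to_enum_item_name := by
  intro name _
  unfold Spec_name_to_enum_item_name name_to_enum_item_name name_to_enum_item_name_alt
  have hfold : name.toList.foldl pvStepA [] = pvT false name.toList := by
    simpa using pvFold_eq name.toList [] false (by simp)
  rw [hfold, pvSplit_eq, pvWmap, (pvMain name.toList).1]
  rfl
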